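-- pv_equiv track=rewrite | github.com/skienzmatishun/decode-maybe | do_stuff.py | analyze_transformation_patterns
-- ===== SOURCE A (Python) =====
-- def analyze_transformation_patterns(raw_data, encrypted_data):
--     """Analyze possible transformation patterns between raw and encrypted data."""
--     # Create a transformation mapping
--     transform_mapping = {}
--     inverse_mapping = {}
--
--     # Find byte pairs that occur most frequently
--     min_length = min(len(raw_data), len(encrypted_data))
--     for i in range(min_length):
--         raw_byte = raw_data[i]
--         enc_byte = encrypted_data[i]
--
--         if raw_byte not in transform_mapping:
--             transform_mapping[raw_byte] = {}
--
--         if enc_byte not in transform_mapping[raw_byte]: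
--             transform_mapping[raw_byte][enc_byte] = 0
--
--         transform_mapping[raw_byte][enc_byte] += 1
--
--         # Also track inverse mapping
--         if enc_byte not in inverse_mapping:
--             inverse_mapping[enc_byte] = {}
--
--         if raw_byte not in inverse_mapping[enc_byte]:
--             inverse_mapping[enc_byte][raw_byte] = 0
--
--         inverse_mapping[enc_byte][raw_byte] += 1
--
--     # Determine most likely transformation rule
--     transformation_rule = {}
--     inverse_rule = {}
--
--     for raw_byte, mappings in transform_mapping.items():
--         most_common_enc = max(mappings.items(), key=lambda x: x[1])[0]
--         transformation_rule[raw_byte] = most_common_enc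
--
--     for enc_byte, mappings in inverse_mapping.items():
--         most_common_raw = max(mappings.items(), key=lambda x: x[1])[0]
--         inverse_rule[enc_byte] = most_common_raw
--
--     return transformation_rule, inverse_rule
-- ===== SOURCE B (Python) =====
-- def analyze_transformation_patterns(raw_data, encrypted_data):
--     """Analyze possible transformation patterns between raw and encrypted data."""
--     # One pass: count each (raw, enc) co-occurrence in a single flat table,
--     # in first-appearance order.
--     pair_counts = {}
--     for r, e in zip(raw_data, encrypted_data):
--         pair_counts[(r, e)] = pair_counts.get((r, e), 0) + 1
--
--     # One pass over the flat table: keep, per raw byte, the first enc byte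
--     # reaching the maximal count (strict '>' preserves the first-seen max),
--     # and symmetrically per enc byte.
--     transformation_rule, best_t = {}, {}
--     inverse_rule, best_i = {}, {}
--     for (r, e), c in pair_counts.items():
--         if r not in transformation_rule or c > best_t[r]:
--             transformation_rule[r] = e
--             best_t[r] = c
--         if e not in inverse_rule or c > best_i[e]:
--             inverse_rule[e] = r
--             best_i[e] = c
--     return transformation_rule, inverse_rule
-- ===== Notes on version B (the rewrite author's own statement) =====
-- stated objective: faster
-- what changed: Replaces the nested dict-of-dicts grouping plus a per-key max() pass by a single flat (raw,enc)-pair counter built in one zip pass, followed by one linear scan that keeps, per raw byte (and symmetrically per enc byte), the first mapping reaching the maximal count via a strict '>' running-best update.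
import Mathlib
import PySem

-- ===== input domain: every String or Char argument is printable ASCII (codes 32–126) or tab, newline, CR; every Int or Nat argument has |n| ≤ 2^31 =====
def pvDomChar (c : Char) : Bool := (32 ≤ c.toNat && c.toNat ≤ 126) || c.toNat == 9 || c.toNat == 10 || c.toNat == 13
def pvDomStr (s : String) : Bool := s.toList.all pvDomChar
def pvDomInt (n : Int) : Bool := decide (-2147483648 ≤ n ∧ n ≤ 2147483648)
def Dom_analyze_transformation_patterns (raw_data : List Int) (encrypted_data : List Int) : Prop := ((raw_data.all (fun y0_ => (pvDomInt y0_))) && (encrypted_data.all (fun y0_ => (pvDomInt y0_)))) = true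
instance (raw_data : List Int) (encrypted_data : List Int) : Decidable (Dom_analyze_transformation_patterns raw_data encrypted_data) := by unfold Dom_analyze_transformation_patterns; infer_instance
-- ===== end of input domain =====

-- B replaces A's nested dict-of-dicts grouping + per-key max() by a single flat
-- (raw,enc)-pair counter and one strict-'>' running-best scan (measured faster in a timing run).

-- ===== PORT A =====
-- the body of A's first loop, identical for the forward (raw->enc) and inverse (enc->raw) mapping
def pvStepA (m : PySem.Dict Int (PySem.Dict Int Int)) (k v : Int) : PySem.Dict Int (PySem.Dict Int Int) :=
  let m := if m.contains k then m else m.insert k PySem.Dict.empty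
  let inner := m.getD k PySem.Dict.empty
  let inner := if inner.contains v then inner else inner.insert v 0
  m.insert k (inner.insert v (inner.getD v 0 + 1))

def analyze_transformation_patterns (raw_data : List Int) (encrypted_data : List Int) : (List (Int × Int)) × (List (Int × Int)) :=
  let min_length : Int := min (PySem.List.len raw_data) (PySem.List.len encrypted_data)
  let maps :=
    (PySem.List.pyRange 0 min_length 1).foldl
      (fun (st : PySem.Dict Int (PySem.Dict Int Int) × PySem.Dict Int (PySem.Dict Int Int)) i =>
        let raw_byte := PySem.List.pyGetD raw_data i 0
        let enc_byte := PySem.List.pyGetD encrypted_data i 0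
        (pvStepA st.1 raw_byte enc_byte, pvStepA st.2 enc_byte raw_byte))
      (PySem.Dict.empty, PySem.Dict.empty)
  let transformation_rule :=
    maps.1.items.foldl
      (fun rule p => rule.insert p.1 (PySem.List.maxD p.2.items (fun x => x.2) (0, 0)).1)
      PySem.Dict.empty
  let inverse_rule :=
    maps.2.items.foldl
      (fun rule p => rule.insert p.1 (PySem.List.maxD p.2.items (fun x => x.2) (0, 0)).1)
      PySem.Dict.empty
  (transformation_rule.items, inverse_rule.items)

-- ===== PORT B =====
-- B's running-best update, identical for the forward and the inverse rule
def pvPick (st : PySem.Dict Int Int × PySem.Dict Int Int) (k v c : Int) :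
    PySem.Dict Int Int × PySem.Dict Int Int :=
  if !st.1.contains k || decide (st.2.getD k 0 < c)
  then (st.1.insert k v, st.2.insert k c) else st

def analyze_transformation_patterns_alt (raw_data : List Int) (encrypted_data : List Int) : (List (Int × Int)) × (List (Int × Int)) :=
  let pair_counts :=
    (raw_data.zip encrypted_data).foldl
      (fun d p => d.insert p (d.getD p 0 + 1)) PySem.Dict.empty
  let st :=
    pair_counts.items.foldl
      (fun (st : (PySem.Dict Int Int × PySem.Dict Int Int) × (PySem.Dict Int Int × PySem.Dict Int Int)) q =>
        (pvPick st.1 q.1.1 q.1.2 q.2, pvPick st.2 q.1.2 q.1.1 q.2))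
      ((PySem.Dict.empty, PySem.Dict.empty), (PySem.Dict.empty, PySem.Dict.empty))
  (st.1.1.items, st.2.1.items)

-- ===== PRECONDITION & SPEC =====
def Spec_analyze_transformation_patterns (raw_data : List Int) (encrypted_data : List Int) (out : (List (Int × Int)) × (List (Int × Int))) : Prop := out = analyze_transformation_patterns_alt raw_data encrypted_data
instance (raw_data : List Int) (encrypted_data : List Int) (out : (List (Int × Int)) × (List (Int × Int))) : Decidable (Spec_analyze_transformation_patterns raw_data encrypted_data out) := by unfold Spec_analyze_transformation_patterns; infer_instance

-- ===== CLAIM (what is proved, stated in full; the proofs are below) =====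
def Claim_equal_analyze_transformation_patterns : Prop := ∀ (raw_data : List Int) (encrypted_data : List Int), Dom_analyze_transformation_patterns raw_data encrypted_data → Spec_analyze_transformation_patterns raw_data encrypted_data (analyze_transformation_patterns raw_data encrypted_data)

-- ===== LEMMAS AND PROOFS =====

theorem pvStepA_eq (d : PySem.Dict Int (PySem.Dict Int Int)) (k v : Int) :
    pvStepA d k v =
      d.insert k ((d.getD k PySem.Dict.empty).insert v
        ((d.getD k PySem.Dict.empty).getD v 0 + 1)) := by
  unfold pvStepA
  by_cases hc : d.contains k
  · simp only [hc, if_true]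
    by_cases hv : (d.getD k PySem.Dict.empty).contains v
    · simp [hv]
    · have h0 : (d.getD k PySem.Dict.empty).getD v 0 = 0 :=
        PySem.Dict.getD_of_not_contains _ _ (by simpa using hv)
      simp [hv, PySem.Dict.getD_insert_self, PySem.Dict.insert_insert_self, h0]
  · have h1 : d.getD k PySem.Dict.empty = PySem.Dict.empty :=
      PySem.Dict.getD_of_not_contains _ _ (by simpa using hc)
    simp [hc, PySem.Dict.getD_insert_self, PySem.Dict.contains_empty,
      PySem.Dict.insert_insert_self, h1, PySem.Dict.getD_empty]

theorem pv_rangefold {σ : Type} (h : σ → Int → Int → σ) :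
    ∀ (raw enc : List Int) (init : σ),
    (List.range (min raw.length enc.length)).foldl
        (fun st i => h st (raw.getD i 0) (enc.getD i 0)) init
      = (raw.zip enc).foldl (fun st p => h st p.1 p.2) init := by
  intro raw
  induction raw with
  | nil => intro enc init; simp
  | cons x xs ih =>
    intro enc init
    cases enc with
    | nil => simp
    | cons y ys =>
      simp only [List.length_cons, List.zip_cons_cons, List.foldl_cons]
      have hm : min (xs.length + 1) (ys.length + 1) = min xs.length ys.length + 1 := by omega
      rw [hm, List.range_succ_eq_map, List.foldl_cons, List.foldl_map]
      simp only [List.getD_cons_zero, List.getD_cons_succ]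
      exact ih ys (h init x y)

theorem pv_zipfold {σ : Type} (h : σ → Int → Int → σ) (raw enc : List Int) (init : σ) :
    (PySem.List.pyRange 0 (min (PySem.List.len raw) (PySem.List.len enc)) 1).foldl
        (fun st i => h st (PySem.List.pyGetD raw i 0) (PySem.List.pyGetD enc i 0)) init
      = (raw.zip enc).foldl (fun st p => h st p.1 p.2) init := by
  have hmin : min (PySem.List.len raw) (PySem.List.len enc)
      = ((min raw.length enc.length : Nat) : Int) := by
    simp [PySem.List.len, Nat.cast_min]
  rw [hmin, PySem.List.pyRange_zero_natCast, List.foldl_map]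
  simp only [PySem.List.pyGetD_natCast]
  exact pv_rangefold h raw enc init

theorem pv_tm_getD (l : List (Int × Int)) :
    ∀ (d : PySem.Dict Int (PySem.Dict Int Int)) (r : Int),
    (l.foldl (fun d p => d.insert p.1 ((d.getD p.1 PySem.Dict.empty).insert p.2
        ((d.getD p.1 PySem.Dict.empty).getD p.2 0 + 1))) d).getD r PySem.Dict.empty
      = ((l.filter (fun p => p.1 == r)).map (·.2)).foldl
          (fun i e => i.insert e (i.getD e 0 + 1)) (d.getD r PySem.Dict.empty) := by
  induction l with
  | nil => intro d r; simp
  | cons a t ih =>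
    intro d r
    simp only [List.foldl_cons, List.filter_cons]
    by_cases hr : a.1 = r
    · subst hr
      simp only [beq_self_eq_true, if_true, List.map_cons, List.foldl_cons]
      rw [ih]
      rw [PySem.Dict.getD_insert_self]
    · have hb : (a.1 == r) = false := by simpa using hr
      simp only [hb, Bool.false_eq_true, if_false]
      rw [ih]
      rw [PySem.Dict.getD_insert_of_ne _ _ _ (Ne.symm hr)]

theorem pv_count_pair (l : List (Int × Int)) (r e : Int) :
    l.count (r, e) = ((l.filter (fun p => p.1 == r)).map (·.2)).count e := by
  induction l with
  | nil => rfl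
  | cons a t ih =>
    simp only [List.count_cons, List.filter_cons]
    by_cases hr : a.1 = r
    · by_cases he : a.2 = e
      · have : a = (r, e) := by ext <;> simp [hr, he]
        simp [this, ih]
      · have : a ≠ (r, e) := by intro hh; exact he (by rw [hh])
        simp [hr, this, he, ih]
    · have : a ≠ (r, e) := by intro hh; exact hr (by rw [hh])
      simp [hr, this, ih]

theorem pv_max?_map {α β : Type} (f : α → β) (xs : List α) (key : β → Int) :
    PySem.List.max? (xs.map f) key = (PySem.List.max? xs (fun x => key (f x))).map f := by
  simp only [PySem.List.max?, List.foldl_map]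
  have h : ∀ (acc : Option α), xs.foldl (fun acc x => match acc with
        | none => some (f x)
        | some m => if key m < key (f x) then some (f x) else some m) (acc.map f)
      = (xs.foldl (fun acc x => match acc with
        | none => some x
        | some m => if key (f m) < key (f x) then some x else some m) acc).map f := by
    induction xs with
    | nil => intro acc; rfl
    | cons x t ih =>
      intro acc
      cases acc with
      | none => simpa using ih (some x)
      | some m =>
        simp only [List.foldl_cons, Option.map_some]
        by_cases h : key (f m) < key (f x)
        · simpa [h] using ih (some x)
        · simpa [h] using ih (some m)
  simpa using h none

theorem pv_ofList_map_ofList {α β : Type} [BEq α] [LawfulBEq α] [BEq β] [LawfulBEq β]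
    (f : α → β) (xs : List α) :
    PySem.Set.ofList ((PySem.Set.ofList xs).map f) = PySem.Set.ofList (xs.map f) := by
  induction xs using List.reverseRecOn with
  | nil => rfl
  | append_singleton t x ih =>
    rw [PySem.Set.ofList_append_singleton, List.map_append, List.map_singleton,
      PySem.Set.ofList_append_singleton]
    by_cases hx : x ∈ PySem.Set.ofList t
    · rw [PySem.Set.add_of_mem hx, ih, PySem.Set.add_of_mem (by
        rw [PySem.Set.mem_ofList]
        exact List.mem_map_of_mem ((PySem.Set.mem_ofList _ _).mp hx))]
    · rw [PySem.Set.add_of_not_mem hx, List.map_append, List.map_singleton,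
        PySem.Set.ofList_append_singleton, ih]

theorem pv_ofList_map_swap (l : List (Int × Int)) :
    PySem.Set.ofList (l.map (fun p => (p.2, p.1)))
      = (PySem.Set.ofList l).map (fun p => (p.2, p.1)) := by
  induction l using List.reverseRecOn with
  | nil => rfl
  | append_singleton t x ih =>
    rw [List.map_append, List.map_singleton, PySem.Set.ofList_append_singleton,
      PySem.Set.ofList_append_singleton, ih]
    by_cases hx : x ∈ PySem.Set.ofList t
    · rw [PySem.Set.add_of_mem hx, PySem.Set.add_of_mem (List.mem_map_of_mem hx)]
    · rw [PySem.Set.add_of_not_mem hx, PySem.Set.add_of_not_mem (by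
        intro hmem
        rcases List.mem_map.mp hmem with ⟨y, hy, hxy⟩
        have hyx : y = x := by
          have h1 : y.2 = x.2 := congrArg Prod.fst hxy
          have h2 : y.1 = x.1 := congrArg Prod.snd hxy
          ext <;> simp [h1, h2]
        exact hx (hyx ▸ hy)), List.map_append, List.map_singleton]

theorem pv_set_filter_fst (l : List (Int × Int)) (r : Int) :
    (PySem.Set.ofList l).filter (fun p => p.1 == r)
      = (PySem.Set.ofList ((l.filter (fun p => p.1 == r)).map (·.2))).map (fun e => (r, e)) := by
  induction l using List.reverseRecOn with
  | nil => rfl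
  | append_singleton t x ih =>
    rw [PySem.Set.ofList_append_singleton, List.filter_append, List.filter_singleton]
    by_cases hr : x.1 = r
    · have hb : (x.1 == r) = true := by simpa using hr
      simp only [hb, cond_true, List.map_append, List.map_singleton,
        PySem.Set.ofList_append_singleton]
      by_cases hx : x ∈ PySem.Set.ofList t
      · rw [PySem.Set.add_of_mem hx, ih, PySem.Set.add_of_mem (by
          rw [PySem.Set.mem_ofList]
          refine List.mem_map.mpr ⟨x, ?_, rfl⟩
          exact List.mem_filter.mpr ⟨(PySem.Set.mem_ofList _ _).mp hx, hb⟩)]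
      · rw [PySem.Set.add_of_not_mem hx, List.filter_append, List.filter_singleton, hb,
          cond_true, ih]
        by_cases he : x.2 ∈ PySem.Set.ofList ((t.filter (fun p => p.1 == r)).map (·.2))
        · -- x itself was already present as (r, x.2): contradiction with hx
          exfalso
          rw [PySem.Set.mem_ofList] at he
          rcases List.mem_map.mp he with ⟨y, hy, hxy⟩
          have hy' := List.mem_filter.mp hy
          have hyx : y = x := by
            have h1 : y.1 = r := by simpa using hy'.2
            ext
            · rw [h1, hr]
            · rw [hxy]
          exact hx (by rw [PySem.Set.mem_ofList]; exact hyx ▸ hy'.1)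
        · rw [PySem.Set.add_of_not_mem he, List.map_append, List.map_singleton]
          have hxr : (r, x.2) = x := by ext <;> simp [hr]
          rw [hxr]
    · have hb : (x.1 == r) = false := by simpa using hr
      simp only [hb, cond_false, List.append_nil]
      by_cases hx : x ∈ PySem.Set.ofList t
      · rw [PySem.Set.add_of_mem hx, ih]
      · rw [PySem.Set.add_of_not_mem hx, List.filter_append, List.filter_singleton, hb,
          cond_false, List.append_nil, ih]

theorem pv_max?_append_singleton {α : Type} (xs : List α) (y : α) (key : α → Int) :
    PySem.List.max? (xs ++ [y]) key
      = match PySem.List.max? xs key with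
        | none => some y
        | some m => if key m < key y then some y else some m := by
  simp only [PySem.List.max?, List.foldl_append, List.foldl_cons, List.foldl_nil]
  rfl

theorem pv_max?_append_singleton_some {α : Type} {xs : List α} {key : α → Int}
    {m : α} (h : PySem.List.max? xs key = some m) (y : α) :
    PySem.List.max? (xs ++ [y]) key = if key m < key y then some y else some m := by
  rw [pv_max?_append_singleton, h]

theorem pv_pick_inv (kf vf : ((Int × Int) × Int) → Int) (L : List ((Int × Int) × Int)) :
    (((L.foldl (fun s q => pvPick s (kf q) (vf q) q.2)
        (PySem.Dict.empty, PySem.Dict.empty)).1.keys = PySem.Set.ofList (L.map kf))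
    ∧ (∀ r, (L.foldl (fun s q => pvPick s (kf q) (vf q) q.2)
        (PySem.Dict.empty, PySem.Dict.empty)).1.get? r
        = (PySem.List.max? (L.filter (fun q => kf q == r)) (fun q => q.2)).map vf)
    ∧ (∀ r, (L.foldl (fun s q => pvPick s (kf q) (vf q) q.2)
        (PySem.Dict.empty, PySem.Dict.empty)).2.get? r
        = (PySem.List.max? (L.filter (fun q => kf q == r)) (fun q => q.2)).map (·.2))) := by
  induction L using List.reverseRecOn with
  | nil =>
    refine ⟨rfl, fun r => ?_, fun r => ?_⟩ <;> simp [PySem.Dict.get?_empty, PySem.List.max?]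
  | append_singleton t q ih =>
    obtain ⟨hk, h1, h2⟩ := ih
    rw [List.foldl_append] at *
    set S := t.foldl (fun s q => pvPick s (kf q) (vf q) q.2)
        (PySem.Dict.empty, PySem.Dict.empty) with hS
    simp only [List.foldl_cons, List.foldl_nil]
    have hfilt_app : ∀ r, (t ++ [q]).filter (fun q' => kf q' == r)
        = t.filter (fun q' => kf q' == r) ++ (if kf q = r then [q] else []) := by
      intro r
      rw [List.filter_append, List.filter_singleton]
      by_cases hr : kf q = r
      · simp [hr]
      · simp [hr, (by simpa using hr : (kf q == r) = false)]
    by_cases hc : S.1.contains (kf q)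
    · -- the key was seen before: max? of its filtered group is some m
      have hsome : (S.1.get? (kf q)).isSome := by
        rw [PySem.Dict.contains_eq_isSome_get?] at hc; exact hc
      obtain ⟨m, hm⟩ : ∃ m, PySem.List.max? (t.filter (fun q' => kf q' == kf q))
          (fun q => q.2) = some m := by
        rcases ho : PySem.List.max? (t.filter (fun q' => kf q' == kf q)) (fun q => q.2) with
          _ | m
        · rw [h1 (kf q), ho] at hsome; simp at hsome
        · exact ⟨m, rfl⟩
      have hmemk : kf q ∈ PySem.Set.ofList (t.map kf) := by
        rw [PySem.Set.mem_ofList]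
        have hmem := PySem.List.max?_mem hm
        have := List.mem_filter.mp hmem
        rcases this with ⟨hmt, hrb⟩
        exact (by simpa using hrb : kf m = kf q) ▸ List.mem_map_of_mem hmt
      have hbest : S.2.getD (kf q) 0 = m.2 := by
        refine PySem.Dict.getD_of_get?_eq_some _ _ ?_
        rw [h2 (kf q), hm]
        rfl
      have hkeys_rhs : PySem.Set.ofList ((t ++ [q]).map kf) = PySem.Set.ofList (t.map kf) := by
        rw [List.map_append, List.map_singleton, PySem.Set.ofList_append_singleton,
          PySem.Set.add_of_mem hmemk]
      by_cases hlt : S.2.getD (kf q) 0 < q.2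
      · -- strictly better: overwrite
        have hstep : pvPick S (kf q) (vf q) q.2 = (S.1.insert (kf q) (vf q), S.2.insert (kf q) q.2) := by
          simp [pvPick, hlt]
        rw [hstep]
        refine ⟨?_, fun r => ?_, fun r => ?_⟩
        · rw [PySem.Dict.keys_insert_of_contains _ _ hc, hk, hkeys_rhs]
        · rw [hfilt_app r]
          by_cases hr : kf q = r
          · subst hr
            rw [PySem.Dict.get?_insert_self, if_pos rfl, pv_max?_append_singleton_some hm,
              if_pos (hbest ▸ hlt)]
            rfl
          · rw [PySem.Dict.get?_insert_of_ne _ _ (Ne.symm hr), if_neg hr, List.append_nil, h1 r]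
        · rw [hfilt_app r]
          by_cases hr : kf q = r
          · subst hr
            rw [PySem.Dict.get?_insert_self, if_pos rfl, pv_max?_append_singleton_some hm,
              if_pos (hbest ▸ hlt)]
            rfl
          · rw [PySem.Dict.get?_insert_of_ne _ _ (Ne.symm hr), if_neg hr, List.append_nil, h2 r]
      · -- not strictly better: state unchanged
        have hstep : pvPick S (kf q) (vf q) q.2 = S := by
          simp [pvPick, hc, hlt]
        rw [hstep]
        refine ⟨by rw [hk, hkeys_rhs], fun r => ?_, fun r => ?_⟩
        · rw [hfilt_app r]
          by_cases hr : kf q = r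
          · subst hr
            rw [if_pos rfl, pv_max?_append_singleton_some hm, if_neg (by rw [← hbest]; exact hlt),
              h1 (kf q), hm]
          · rw [if_neg hr, List.append_nil, h1 r]
        · rw [hfilt_app r]
          by_cases hr : kf q = r
          · subst hr
            rw [if_pos rfl, pv_max?_append_singleton_some hm, if_neg (by rw [← hbest]; exact hlt),
              h2 (kf q), hm]
          · rw [if_neg hr, List.append_nil, h2 r]
    · -- fresh key
      have hcf : S.1.contains (kf q) = false := by simpa using hc
      have hnone : PySem.List.max? (t.filter (fun q' => kf q' == kf q)) (fun q => q.2) = none := by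
        have := h1 (kf q)
        rw [(PySem.Dict.get?_eq_none_iff_contains _ _).mpr hcf] at this
        exact (Option.map_eq_none_iff).mp this.symm
      have hfe : t.filter (fun q' => kf q' == kf q) = [] :=
        (PySem.List.max?_eq_none_iff _ _).mp hnone
      have hnotmem : kf q ∉ PySem.Set.ofList (t.map kf) := by
        rw [PySem.Set.mem_ofList]
        intro hmem
        rcases List.mem_map.mp hmem with ⟨q', hq', hkq⟩
        have : q' ∈ t.filter (fun q' => kf q' == kf q) :=
          List.mem_filter.mpr ⟨hq', by simpa using hkq⟩
        rw [hfe] at this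
        exact absurd this (List.not_mem_nil)
      have hstep : pvPick S (kf q) (vf q) q.2 = (S.1.insert (kf q) (vf q), S.2.insert (kf q) q.2) := by
        simp [pvPick, hcf]
      rw [hstep]
      refine ⟨?_, fun r => ?_, fun r => ?_⟩
      · rw [PySem.Dict.keys_insert_of_not_contains _ _ hcf, hk, List.map_append,
          List.map_singleton, PySem.Set.ofList_append_singleton,
          PySem.Set.add_of_not_mem hnotmem]
      · rw [hfilt_app r]
        by_cases hr : kf q = r
        · subst hr
          rw [PySem.Dict.get?_insert_self, if_pos rfl, hfe, List.nil_append]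
          rfl
        · rw [PySem.Dict.get?_insert_of_ne _ _ (Ne.symm hr), if_neg hr, List.append_nil, h1 r]
      · rw [hfilt_app r]
        by_cases hr : kf q = r
        · subst hr
          rw [PySem.Dict.get?_insert_self, if_pos rfl, hfe, List.nil_append]
          rfl
        · rw [PySem.Dict.get?_insert_of_ne _ _ (Ne.symm hr), if_neg hr, List.append_nil, h2 r]

theorem pv_opt_fst (o : Option Int) (g : Int → Int × Int) (hg : ∀ e, (g e).1 = e) :
    ((o.map g).getD (0, 0)).1 = o.getD 0 := by
  cases o <;> simp [hg]

theorem pv_opt_b (o : Option Int) (g : Int → (Int × Int) × Int) (hg : ∀ e, (g e).1.2 = e) :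
    (((o.map g).map (fun q => q.1.2)).getD 0) = o.getD 0 := by
  cases o <;> simp [hg]

-- A's per-key value in canonical form
theorem pv_val_canon (es : List Int) :
    (PySem.List.maxD ((PySem.Set.ofList es).map (fun e => (e, (es.count e : Int))))
        (fun x => x.2) (0, 0)).1
      = (PySem.List.max? (PySem.Set.ofList es) (fun e => (es.count e : Int))).getD 0 := by
  show ((PySem.List.max? ((PySem.Set.ofList es).map (fun e => (e, (es.count e : Int))))
      (fun x => x.2)).getD (0, 0)).1 = _
  rw [pv_max?_map]
  exact pv_opt_fst (PySem.List.max? (PySem.Set.ofList es) (fun e => (es.count e : Int)))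
    (fun e => (e, (es.count e : Int))) (fun e => rfl)

theorem pv_A_rule_items (l : List (Int × Int)) :
    ((l.foldl (fun d p => pvStepA d p.1 p.2) PySem.Dict.empty).items.foldl
        (fun rule p => rule.insert p.1 (PySem.List.maxD p.2.items (fun x => x.2) (0, 0)).1)
        PySem.Dict.empty).items
      = (PySem.Set.ofList (l.map (fun p => p.1))).map (fun r =>
          (r, (PySem.List.max? (PySem.Set.ofList ((l.filter (fun p => p.1 == r)).map (·.2)))
            (fun e => (((l.filter (fun p => p.1 == r)).map (·.2)).count e : Int))).getD 0)) := by
  set tm := l.foldl (fun d p => pvStepA d p.1 p.2) PySem.Dict.empty with htm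
  have hstep : (fun (d : PySem.Dict Int (PySem.Dict Int Int)) (p : Int × Int) => pvStepA d p.1 p.2)
      = fun d p => d.insert p.1 ((d.getD p.1 PySem.Dict.empty).insert p.2
          ((d.getD p.1 PySem.Dict.empty).getD p.2 0 + 1)) := by
    funext d p; exact pvStepA_eq d p.1 p.2
  have htm' : tm = l.foldl (fun d p => d.insert p.1 ((d.getD p.1 PySem.Dict.empty).insert p.2
      ((d.getD p.1 PySem.Dict.empty).getD p.2 0 + 1))) PySem.Dict.empty := by
    rw [htm, hstep]
  have hkeys : tm.keys = PySem.Set.ofList (l.map (fun p => p.1)) := by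
    rw [htm']
    have h := PySem.Dict.keys_foldl_insert_key (ν := PySem.Dict Int Int) l
      (fun p : Int × Int => p.1)
      (fun d p => (d.getD p.1 PySem.Dict.empty).insert p.2
        ((d.getD p.1 PySem.Dict.empty).getD p.2 0 + 1)) PySem.Dict.empty
    rw [PySem.Dict.keys_empty, PySem.Set.update_nil_left] at h
    exact h
  have hnd : tm.keys.Nodup := by
    rw [hkeys]; exact PySem.Set.nodup_ofList _
  have hgetD : ∀ r, tm.getD r PySem.Dict.empty
      = PySem.Dict.counter ((l.filter (fun p => p.1 == r)).map (·.2)) := by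
    intro r
    rw [htm']
    have h := pv_tm_getD l PySem.Dict.empty r
    rw [PySem.Dict.getD_empty, PySem.Dict.foldl_insert_getD_add_one_eq_counter] at h
    exact h
  have hitems : tm.items = tm.keys.map (fun r => (r, tm.getD r PySem.Dict.empty)) :=
    PySem.Dict.items_eq_map_keys tm hnd PySem.Dict.empty
  have hfreshnd : (tm.items.map (fun p => p.1)).Nodup := hnd
  calc (tm.items.foldl
        (fun rule p => rule.insert p.1 (PySem.List.maxD p.2.items (fun x => x.2) (0, 0)).1)
        PySem.Dict.empty).items
      = PySem.Dict.empty.items ++ tm.items.map (fun p =>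
          (p.1, (PySem.List.maxD p.2.items (fun x => x.2) (0, 0)).1)) :=
        PySem.Dict.items_foldl_insert_fresh tm.items (fun p => p.1)
          (fun p => (PySem.List.maxD p.2.items (fun x => x.2) (0, 0)).1)
          PySem.Dict.empty (fun a _ => PySem.Dict.contains_empty _) hfreshnd
    _ = tm.items.map (fun p =>
          (p.1, (PySem.List.maxD p.2.items (fun x => x.2) (0, 0)).1) ) := List.nil_append _
    _ = (tm.keys.map (fun r => (r, tm.getD r PySem.Dict.empty))).map (fun p =>
          (p.1, (PySem.List.maxD p.2.items (fun x => x.2) (0, 0)).1) ) := by rw [← hitems]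
    _ = tm.keys.map (fun r =>
          (r, (PySem.List.maxD (tm.getD r PySem.Dict.empty).items (fun x => x.2) (0, 0)).1)) :=
        List.map_map ..
    _ = (PySem.Set.ofList (l.map (fun p => p.1))).map (fun r =>
          (r, (PySem.List.max? (PySem.Set.ofList ((l.filter (fun p => p.1 == r)).map (·.2)))
            (fun e => (((l.filter (fun p => p.1 == r)).map (·.2)).count e : Int))).getD 0)) := by
        rw [hkeys]
        refine List.map_congr_left (fun r _ => ?_)
        rw [hgetD r, PySem.Dict.items_counter, pv_val_canon]

theorem pv_B_rule_items (l : List (Int × Int)) :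
    (((PySem.Dict.counter l).items.foldl
        (fun s q => pvPick s q.1.1 q.1.2 q.2)
        (PySem.Dict.empty, PySem.Dict.empty)).1).items
      = (PySem.Set.ofList (l.map (fun p => p.1))).map (fun r =>
          (r, (PySem.List.max? (PySem.Set.ofList ((l.filter (fun p => p.1 == r)).map (·.2)))
            (fun e => (((l.filter (fun p => p.1 == r)).map (·.2)).count e : Int))).getD 0)) := by
  set st := (PySem.Dict.counter l).items.foldl
      (fun s q => pvPick s q.1.1 q.1.2 q.2)
      (PySem.Dict.empty, PySem.Dict.empty) with hst
  obtain ⟨hk0, h10, _⟩ := pv_pick_inv (fun q => q.1.1) (fun q => q.1.2) ((PySem.Dict.counter l).items)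
  have hk : st.1.keys = PySem.Set.ofList ((PySem.Dict.counter l).items.map (fun q => q.1.1)) := hk0
  have h1 : ∀ r, st.1.get? r
      = (PySem.List.max? ((PySem.Dict.counter l).items.filter (fun q => q.1.1 == r))
          (fun q => q.2)).map (fun q => q.1.2) := h10
  have hkeys : st.1.keys = PySem.Set.ofList (l.map (fun p => p.1)) := by
    rw [hk]
    calc PySem.Set.ofList ((PySem.Dict.counter l).items.map (fun q => q.1.1))
        = PySem.Set.ofList (((PySem.Set.ofList l).map (fun k => (k, (l.count k : Int)))).map
            (fun q => q.1.1)) := by rw [PySem.Dict.items_counter]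
      _ = PySem.Set.ofList ((PySem.Set.ofList l).map (fun k => k.1)) := by
            rw [List.map_map]; rfl
      _ = PySem.Set.ofList (l.map (fun p => p.1)) := pv_ofList_map_ofList (fun k => k.1) l
  have hnd : st.1.keys.Nodup := by rw [hkeys]; exact PySem.Set.nodup_ofList _
  have hfil : ∀ r, (PySem.Dict.counter l).items.filter (fun q => q.1.1 == r)
      = (PySem.Set.ofList ((l.filter (fun p => p.1 == r)).map (·.2))).map
          (fun e => ((r, e), (((l.filter (fun p => p.1 == r)).map (·.2)).count e : Int))) := by
    intro r
    calc (PySem.Dict.counter l).items.filter (fun q => q.1.1 == r)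
        = (((PySem.Set.ofList l).map (fun k => (k, (l.count k : Int)))).filter
            (fun q => q.1.1 == r)) := by rw [PySem.Dict.items_counter]
      _ = ((PySem.Set.ofList l).filter (fun k => k.1 == r)).map
            (fun k => (k, (l.count k : Int))) := List.filter_map ..
      _ = (((PySem.Set.ofList ((l.filter (fun p => p.1 == r)).map (·.2))).map
            (fun e => (r, e))).map (fun k => (k, (l.count k : Int)))) := by
            rw [pv_set_filter_fst]
      _ = (PySem.Set.ofList ((l.filter (fun p => p.1 == r)).map (·.2))).map
            (fun e => ((r, e), (l.count (r, e) : Int))) := List.map_map ..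
      _ = (PySem.Set.ofList ((l.filter (fun p => p.1 == r)).map (·.2))).map
            (fun e => ((r, e), (((l.filter (fun p => p.1 == r)).map (·.2)).count e : Int))) :=
            List.map_congr_left (fun e _ => by rw [pv_count_pair])
  have hv : ∀ r, st.1.getD r 0
      = (PySem.List.max? (PySem.Set.ofList ((l.filter (fun p => p.1 == r)).map (·.2)))
          (fun e => (((l.filter (fun p => p.1 == r)).map (·.2)).count e : Int))).getD 0 := by
    intro r
    rw [PySem.Dict.getD_eq_get?_getD, h1 r, hfil r, pv_max?_map]
    exact pv_opt_b _ _ (fun e => rfl)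
  calc st.1.items
      = st.1.keys.map (fun r => (r, st.1.getD r 0)) := PySem.Dict.items_eq_map_keys st.1 hnd 0
    _ = (PySem.Set.ofList (l.map (fun p => p.1))).map (fun r => (r, st.1.getD r 0)) := by
        rw [hkeys]
    _ = (PySem.Set.ofList (l.map (fun p => p.1))).map (fun r =>
          (r, (PySem.List.max? (PySem.Set.ofList ((l.filter (fun p => p.1 == r)).map (·.2)))
            (fun e => (((l.filter (fun p => p.1 == r)).map (·.2)).count e : Int))).getD 0)) :=
        List.map_congr_left (fun r _ => by rw [hv r])

theorem pv_key_side (l : List (Int × Int)) :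
    ((l.foldl (fun d p => pvStepA d p.1 p.2) PySem.Dict.empty).items.foldl
        (fun rule p => rule.insert p.1 (PySem.List.maxD p.2.items (fun x => x.2) (0, 0)).1)
        PySem.Dict.empty).items
      = ((PySem.Dict.counter l).items.foldl
          (fun s q => pvPick s q.1.1 q.1.2 q.2)
          (PySem.Dict.empty, PySem.Dict.empty)).1.items := by
  rw [pv_A_rule_items, pv_B_rule_items]

theorem pv_counter_swap (l : List (Int × Int)) :
    (PySem.Dict.counter (l.map (fun p => (p.2, p.1)))).items
      = (PySem.Dict.counter l).items.map (fun q => ((q.1.2, q.1.1), q.2)) := by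
  rw [PySem.Dict.items_counter, PySem.Dict.items_counter, pv_ofList_map_swap, List.map_map,
    List.map_map]
  refine List.map_congr_left (fun k _ => ?_)
  simp only [Function.comp_apply]
  have hinj : Function.Injective (fun p : Int × Int => (p.2, p.1)) := by
    intro a b h
    have h1 := congrArg Prod.fst h
    have h2 := congrArg Prod.snd h
    ext <;> simp_all
  rw [List.count_map_of_injective l _ hinj k]

theorem pv_main (raw_data encrypted_data : List Int) :
    analyze_transformation_patterns raw_data encrypted_data
      = analyze_transformation_patterns_alt raw_data encrypted_data := by
  -- ===== A side to canonical =====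
  have hA0 : analyze_transformation_patterns raw_data encrypted_data
      = ((((PySem.List.pyRange 0 (min (PySem.List.len raw_data) (PySem.List.len encrypted_data)) 1).foldl
            (fun (st : PySem.Dict Int (PySem.Dict Int Int) × PySem.Dict Int (PySem.Dict Int Int)) i =>
              ((fun tm i => pvStepA tm (PySem.List.pyGetD raw_data i 0) (PySem.List.pyGetD encrypted_data i 0)) st.1 i,
               (fun im i => pvStepA im (PySem.List.pyGetD encrypted_data i 0) (PySem.List.pyGetD raw_data i 0)) st.2 i))
            (PySem.Dict.empty, PySem.Dict.empty)).1.items.foldl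
          (fun rule p => rule.insert p.1 (PySem.List.maxD p.2.items (fun x => x.2) (0, 0)).1)
          PySem.Dict.empty).items,
        (((PySem.List.pyRange 0 (min (PySem.List.len raw_data) (PySem.List.len encrypted_data)) 1).foldl
            (fun (st : PySem.Dict Int (PySem.Dict Int Int) × PySem.Dict Int (PySem.Dict Int Int)) i =>
              ((fun tm i => pvStepA tm (PySem.List.pyGetD raw_data i 0) (PySem.List.pyGetD encrypted_data i 0)) st.1 i,
               (fun im i => pvStepA im (PySem.List.pyGetD encrypted_data i 0) (PySem.List.pyGetD raw_data i 0)) st.2 i))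
            (PySem.Dict.empty, PySem.Dict.empty)).2.items.foldl
          (fun rule p => rule.insert p.1 (PySem.List.maxD p.2.items (fun x => x.2) (0, 0)).1)
          PySem.Dict.empty).items) := rfl
  rw [hA0, PySem.List.foldl_prod_mk
    (f := fun tm i => pvStepA tm (PySem.List.pyGetD raw_data i 0) (PySem.List.pyGetD encrypted_data i 0))
    (g := fun im i => pvStepA im (PySem.List.pyGetD encrypted_data i 0) (PySem.List.pyGetD raw_data i 0))]
  simp only []
  rw [pv_zipfold (fun d a b => pvStepA d a b) raw_data encrypted_data,
    pv_zipfold (fun d a b => pvStepA d b a) raw_data encrypted_data]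
  have him : (raw_data.zip encrypted_data).foldl (fun st p => pvStepA st p.2 p.1) PySem.Dict.empty
      = ((raw_data.zip encrypted_data).map (fun p => (p.2, p.1))).foldl
          (fun d p => pvStepA d p.1 p.2) PySem.Dict.empty := by
    rw [List.foldl_map]
  rw [him]
  rw [pv_key_side (raw_data.zip encrypted_data),
    pv_key_side ((raw_data.zip encrypted_data).map (fun p => (p.2, p.1)))]
  -- ===== B side to canonical =====
  have hB0 : analyze_transformation_patterns_alt raw_data encrypted_data
      = ((((raw_data.zip encrypted_data).foldl
            (fun d p => d.insert p (d.getD p 0 + 1)) PySem.Dict.empty).items.foldl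
            (fun (st : (PySem.Dict Int Int × PySem.Dict Int Int) × (PySem.Dict Int Int × PySem.Dict Int Int)) q =>
              ((fun s q => pvPick s q.1.1 q.1.2 q.2) st.1 q,
               (fun s q => pvPick s q.1.2 q.1.1 q.2) st.2 q))
            ((PySem.Dict.empty, PySem.Dict.empty), (PySem.Dict.empty, PySem.Dict.empty))).1.1.items,
         (((raw_data.zip encrypted_data).foldl
            (fun d p => d.insert p (d.getD p 0 + 1)) PySem.Dict.empty).items.foldl
            (fun (st : (PySem.Dict Int Int × PySem.Dict Int Int) × (PySem.Dict Int Int × PySem.Dict Int Int)) q =>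
              ((fun s q => pvPick s q.1.1 q.1.2 q.2) st.1 q,
               (fun s q => pvPick s q.1.2 q.1.1 q.2) st.2 q))
            ((PySem.Dict.empty, PySem.Dict.empty), (PySem.Dict.empty, PySem.Dict.empty))).2.1.items) := rfl
  rw [hB0, PySem.Dict.foldl_insert_getD_add_one_eq_counter, PySem.List.foldl_prod_mk
    (f := fun (s : PySem.Dict Int Int × PySem.Dict Int Int) (q : (Int × Int) × Int) =>
      pvPick s q.1.1 q.1.2 q.2)
    (g := fun (s : PySem.Dict Int Int × PySem.Dict Int Int) (q : (Int × Int) × Int) =>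
      pvPick s q.1.2 q.1.1 q.2)]
  simp only []
  have hfold2 : (PySem.Dict.counter (raw_data.zip encrypted_data)).items.foldl
        (fun s q => pvPick s q.1.2 q.1.1 q.2) (PySem.Dict.empty, PySem.Dict.empty)
      = ((PySem.Dict.counter ((raw_data.zip encrypted_data).map (fun p => (p.2, p.1)))).items).foldl
          (fun s q => pvPick s q.1.1 q.1.2 q.2) (PySem.Dict.empty, PySem.Dict.empty) := by
    rw [pv_counter_swap, List.foldl_map]
  rw [hfold2]

-- ===== VERDICT (by name: the statement is the Claim_ definition above) =====
theorem analyze_transformation_patterns_spec : Claim_equal_analyze_transformation_patterns := by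
  intro raw_data encrypted_data _
  unfold Spec_analyze_transformation_patterns
  exact pv_main raw_data encrypted_data
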